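-- pv_equiv track=rewrite | github.com/brionydunbar/coding-challenges | fibonacci_even_sum.py | even_fibonacci_sum
-- ===== SOURCE A (Python) =====
-- def fib(n):
--     if n == 0:
--         return 0
--     elif n == 1:
--         return 1
--     return fib(n - 1) + fib(n - 2)
--
-- def even_fibonacci_sum(limit):
--     fib_numbers = []
--     for num in range(0, limit):
--         fib_num = fib(num)
--         fib_numbers.append(fib_num)
--     even_fib = []
--     for num in fib_numbers:
--         if num % 2 == 0:
--             even_fib.append(num)
--         else:
--             continue
--     even_sum = sum(even_fib)
--     return even_sum
-- ===== SOURCE B (Python) =====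
-- def even_fibonacci_sum(limit):
--     a, b = 0, 1
--     total = 0
--     for _ in range(limit):
--         if a % 2 == 0:
--             total += a
--         a, b = b, a + b
--     return total
-- ===== Notes on version B (the rewrite author's own statement) =====
-- stated objective: faster
-- what changed: Replaced per-term exponential recursive fib plus two list-building passes by a single iterative loop carrying the Fibonacci pair and accumulating even terms directly.
import Mathlib
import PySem

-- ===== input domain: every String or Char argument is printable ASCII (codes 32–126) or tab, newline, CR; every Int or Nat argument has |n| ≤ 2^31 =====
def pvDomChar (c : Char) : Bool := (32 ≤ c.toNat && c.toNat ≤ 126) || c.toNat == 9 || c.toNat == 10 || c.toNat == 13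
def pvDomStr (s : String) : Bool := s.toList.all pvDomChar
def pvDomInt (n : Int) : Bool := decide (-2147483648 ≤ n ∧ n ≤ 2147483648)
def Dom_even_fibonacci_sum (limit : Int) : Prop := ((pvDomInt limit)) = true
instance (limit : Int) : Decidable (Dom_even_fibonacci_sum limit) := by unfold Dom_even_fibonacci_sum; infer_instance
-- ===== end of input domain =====

-- B replaces A's exponential recursive fib and two list-building passes by one
-- iterative loop over the Fibonacci pair that accumulates even terms directly.

-- ===== PORT A =====
-- A's recursive fib; A only calls it on the nonnegative arguments produced by
-- range(0, limit), so a Nat-indexed transcription is exact there.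
def fibA : Nat → Int
  | 0 => 0
  | 1 => 1
  | n + 2 => fibA (n + 1) + fibA n

def even_fibonacci_sum (limit : Int) : Int :=
  -- first loop: fib_numbers.append(fib(num)) over range(0, limit)
  let fib_numbers := (PySem.List.pyRange 0 limit 1).foldl
    (fun acc num => acc ++ [fibA num.toNat]) []
  -- second loop: even_fib.append(num) when num % 2 == 0
  let even_fib := fib_numbers.foldl
    (fun acc num => if num % 2 = 0 then acc ++ [num] else acc) []
  even_fib.sum

-- ===== PORT B =====
-- for _ in range(limit): loop, carrying (a, b, total)
def ebLoop : Nat → Int → Int → Int → Int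
  | 0, _, _, total => total
  | n + 1, a, b, total => ebLoop n b (a + b) (if a % 2 = 0 then total + a else total)

def even_fibonacci_sum_alt (limit : Int) : Int := ebLoop limit.toNat 0 1 0

-- ===== PRECONDITION & SPEC =====
def Spec_even_fibonacci_sum (limit : Int) (out : Int) : Prop := out = even_fibonacci_sum_alt limit
instance (limit : Int) (out : Int) : Decidable (Spec_even_fibonacci_sum limit out) := by unfold Spec_even_fibonacci_sum; infer_instance

-- ===== CLAIM (what is proved, stated in full; the proofs are below) =====
def Claim_equal_even_fibonacci_sum : Prop := ∀ (limit : Int), Dom_even_fibonacci_sum limit → Spec_even_fibonacci_sum limit (even_fibonacci_sum limit)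

-- ===== LEMMAS AND PROOFS =====

lemma ebLoop_eq (n : Nat) : ∀ (k : Nat) (s : Int),
    ebLoop n (fibA k) (fibA (k + 1)) s
      = s + (((List.range n).map (fun i => fibA (k + i))).filter (fun x => x % 2 = 0)).sum := by
  induction n with
  | zero => intro k s; simp [ebLoop]
  | succ n ih =>
    intro k s
    have hfib : fibA k + fibA (k + 1) = fibA (k + 2) := by
      simp [fibA]; ring
    have := ih (k + 1) (if fibA k % 2 = 0 then s + fibA k else s)
    simp only [ebLoop, hfib] at *
    rw [this]
    rw [List.range_succ_eq_map]
    simp only [List.map_cons, List.map_map, List.filter_cons]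
    by_cases h : fibA k % 2 = 0 <;>
      simp [h, Function.comp_def, Nat.add_comm, add_assoc]

theorem even_fibonacci_sum_spec : Claim_equal_even_fibonacci_sum := by
  unfold Claim_equal_even_fibonacci_sum Spec_even_fibonacci_sum
  intro limit _
  unfold even_fibonacci_sum even_fibonacci_sum_alt
  rw [PySem.List.pyRange_one]
  simp only [PySem.List.foldl_append_singleton_eq_map, List.map_map,
    PySem.List.foldl_append_ite_eq_filter, List.nil_append, Int.sub_zero]
  have := ebLoop_eq limit.toNat 0 0
  simp only [zero_add, fibA] at this
  rw [this]
  congr 2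
  simp [Function.comp_def]

-- ===== VERDICT (by name: the statement is the Claim_ definition above) =====
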